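-- pv_equiv track=rewrite | github.com/tagore8661/accenture-coding-practice | Problem-34.py | find_number_of_superior_elements
-- ===== SOURCE A (Python) =====
-- def find_number_of_superior_elements(arr):
--     n = len(arr)
--     if n == 0 :
--         return 0
--     count = 1
--     max_right_ele = arr[-1]
--     for i in range(n-2 , -1 ,-1):
--         if arr[i] > max_right_ele:
--             count += 1
--             max_right_ele = arr[i]
--     return count
-- ===== SOURCE B (Python) =====
-- def find_number_of_superior_elements(arr):
--     n = len(arr)
--     return sum(1 for i in range(n) if all(arr[j] < arr[i] for j in range(i + 1, n)))
-- ===== Notes on version B (the rewrite author's own statement) =====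
-- stated objective: simpler
-- what changed: Replaces the backward running-max scan by a direct one-line definition: count indices whose every right neighbour is strictly smaller (nested scan).
import Mathlib
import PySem

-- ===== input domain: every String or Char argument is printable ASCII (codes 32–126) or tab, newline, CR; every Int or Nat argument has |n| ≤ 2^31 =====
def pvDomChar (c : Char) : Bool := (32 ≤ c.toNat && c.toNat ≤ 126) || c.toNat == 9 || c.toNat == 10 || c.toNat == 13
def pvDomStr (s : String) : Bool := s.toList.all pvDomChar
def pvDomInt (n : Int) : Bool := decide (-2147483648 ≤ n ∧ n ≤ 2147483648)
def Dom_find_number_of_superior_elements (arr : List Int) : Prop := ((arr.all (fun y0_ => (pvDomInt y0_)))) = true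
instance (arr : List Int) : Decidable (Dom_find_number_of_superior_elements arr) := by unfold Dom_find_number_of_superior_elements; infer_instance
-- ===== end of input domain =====

-- B replaces A's backward running-max scan by the direct definition (count indices whose
-- every right neighbour is strictly smaller); simpler, not faster (O(n^2) vs O(n)).

-- ===== PORT A =====
-- backward loop: count = 1; max_right_ele = arr[-1]; for i in range(n-2, -1, -1): ...
def find_number_of_superior_elements (arr : List Int) : Int :=
  let n : Int := PySem.List.len arr
  if n = 0 then 0
  else
    let st := (PySem.List.pyRange (n - 2) (-1) (-1)).foldl
      (fun (st : Int × Int) i =>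
        if PySem.List.pyGetD arr i 0 > st.2 then (st.1 + 1, PySem.List.pyGetD arr i 0) else st)
      (1, PySem.List.pyGetD arr (-1) 0)   -- arr[-1]: in range since n ≠ 0
    st.1

-- ===== PORT B =====
-- sum(1 for i in range(n) if all(arr[j] < arr[i] for j in range(i+1, n)))
def find_number_of_superior_elements_alt (arr : List Int) : Int :=
  let n : Int := PySem.List.len arr
  ((PySem.List.pyRange 0 n 1).map (fun i =>
      if (PySem.List.pyRange (i + 1) n 1).all
          (fun j => PySem.List.pyGetD arr j 0 < PySem.List.pyGetD arr i 0)
        then (1 : Int) else 0)).sum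

-- ===== PRECONDITION & SPEC =====
def Spec_find_number_of_superior_elements (arr : List Int) (out : Int) : Prop := out = find_number_of_superior_elements_alt arr
instance (arr : List Int) (out : Int) : Decidable (Spec_find_number_of_superior_elements arr out) := by unfold Spec_find_number_of_superior_elements; infer_instance

-- ===== CLAIM (what is proved, stated in full; the proofs are below) =====
def Claim_equal_find_number_of_superior_elements : Prop := ∀ (arr : List Int), Dom_find_number_of_superior_elements arr → Spec_find_number_of_superior_elements arr (find_number_of_superior_elements arr)

-- ===== LEMMAS AND PROOFS =====

-- the common value: number of "leaders" (elements greater than everything to their right)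
def countLeaders : List Int → Int
  | [] => 0
  | x :: xs => (if xs.all (fun v => decide (v < x)) then 1 else 0) + countLeaders xs

-- x beats the running max of (zs ++ [y]) iff it beats every element
lemma gt_foldr_max_iff (zs : List Int) (y x : Int) :
    x > zs.foldr max y ↔ ((zs ++ [y]).all (fun v => decide (v < x)) = true) := by
  induction zs with
  | nil => simp
  | cons z zs ih =>
    simp only [List.foldr_cons, List.cons_append, List.all_cons, Bool.and_eq_true,
      decide_eq_true_eq]
    constructor
    · intro h
      have hz : z < x := lt_of_le_of_lt (le_max_left _ _) h
      have hm : x > zs.foldr max y := lt_of_le_of_lt (le_max_right _ _) h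
      exact ⟨hz, (ih.mp hm)⟩
    · rintro ⟨hz, hrest⟩
      have hm := ih.mpr hrest
      exact max_lt hz hm

-- invariant of A's backward loop, stated as a foldr over the dropped-last prefix
lemma foldr_step_eq (zs : List Int) (y : Int) :
    zs.foldr (fun v (st : Int × Int) => if v > st.2 then (st.1 + 1, v) else st) (1, y)
      = (countLeaders (zs ++ [y]), zs.foldr max y) := by
  induction zs with
  | nil => simp [countLeaders]
  | cons z zs ih =>
    simp only [List.foldr_cons, ih, List.cons_append, countLeaders]
    by_cases h : z > zs.foldr max y
    · rw [if_pos h, if_pos ((gt_foldr_max_iff zs y z).mp h)]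
      simp [max_eq_left (le_of_lt h), add_comm]
    · rw [if_neg h, if_neg (fun hb => h ((gt_foldr_max_iff zs y z).mpr hb))]
      simp [max_eq_right (le_of_not_gt h)]

-- B's sum over indices equals countLeaders
lemma sum_form (arr : List Int) :
    ((List.range arr.length).map (fun k =>
        if (arr.drop (k + 1)).all (fun v => decide (v < arr.getD k 0)) then (1 : Int) else 0)).sum
      = countLeaders arr := by
  induction arr with
  | nil => simp [countLeaders]
  | cons x xs ih =>
    rw [List.length_cons, List.range_succ_eq_map]
    simp only [List.map_cons, List.map_map, List.sum_cons, Function.comp_def]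
    have hm : ((List.range xs.length).map (fun k =>
        if ((x :: xs).drop (k + 1 + 1)).all (fun v => decide (v < (x :: xs).getD (k + 1) 0))
          then (1 : Int) else 0))
        = ((List.range xs.length).map (fun k =>
        if (xs.drop (k + 1)).all (fun v => decide (v < xs.getD k 0)) then (1 : Int) else 0)) := by
      apply List.map_congr_left
      intro k _
      simp
    rw [hm, ih]
    simp [countLeaders]

lemma alt_eq_countLeaders (arr : List Int) :
    find_number_of_superior_elements_alt arr = countLeaders arr := by
  unfold find_number_of_superior_elements_alt
  simp only [PySem.List.len_eq]
  rw [PySem.List.pyRange_zero_natCast]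
  rw [← sum_form arr]
  simp only [List.map_map]
  apply congrArg
  apply List.map_congr_left
  intro k hk
  simp only [Function.comp_def]
  have hcast : ((k : Int) + 1) = ((k + 1 : Nat) : Int) := by push_cast; ring
  have hmap := PySem.List.map_pyGetD_pyRange (xs := arr) (a := ((k + 1 : Nat) : Int)) (d := 0)
    (by positivity)
  simp only [Int.toNat_natCast, PySem.List.len_eq] at hmap
  have hall : (PySem.List.pyRange ((k : Int) + 1) (arr.length : Int) 1).all
      (fun j => decide (PySem.List.pyGetD arr j 0 < PySem.List.pyGetD arr (k : Int) 0))
      = (arr.drop (k + 1)).all (fun v => decide (v < arr.getD k 0)) := by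
    rw [hcast, ← hmap, List.all_map]
    simp [Function.comp_def]
  simp only [hall]

lemma a_eq_countLeaders (arr : List Int) :
    find_number_of_superior_elements arr = countLeaders arr := by
  unfold find_number_of_superior_elements
  cases arr with
  | nil => simp [countLeaders]
  | cons x xs =>
    simp only [PySem.List.len_eq, List.length_cons]
    rw [if_neg (by omega)]
    have hne : x :: xs ≠ [] := List.cons_ne_nil x xs
    -- the countdown range is the reverse of an ascending one; foldl over it is a foldr
    have hrange : PySem.List.pyRange (((xs.length + 1 : Nat) : Int) - 2) (-1) (-1)
        = (PySem.List.pyRange 0 (xs.length : Int) 1).reverse := by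
      have h2 : ((xs.length + 1 : Nat) : Int) - 2 + 1 = (xs.length : Int) := by push_cast; ring
      rw [PySem.List.pyRange_neg_one_eq_reverse, h2]
      norm_num
    rw [hrange, List.foldl_reverse]
    -- turn the index foldr into a foldr over the elements of arr.dropLast
    have hlast : PySem.List.pyGetD (x :: xs) (-1) 0 = (x :: xs).getLast hne :=
      PySem.List.pyGetD_neg_one (x :: xs) 0 hne
    have hmap : (PySem.List.pyRange 0 (xs.length : Int) 1).map
        (fun i => PySem.List.pyGetD (x :: xs) i 0) = (x :: xs).dropLast := by
      have h2 := PySem.List.map_pyGetD_pyRange (xs := (x :: xs).dropLast)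
        (a := (0 : Int)) (d := 0) (le_refl 0)
      simp only [PySem.List.len_eq, Int.toNat_zero, List.drop_zero,
        List.length_dropLast, List.length_cons, Nat.add_sub_cancel] at h2
      rw [← h2]
      apply List.map_congr_left
      intro i hi
      rw [PySem.List.mem_pyRange_one] at hi
      obtain ⟨h0, hlt⟩ := hi
      rw [PySem.List.pyGetD_eq_getElem (x :: xs) 0 h0 (by simp at hlt ⊢; omega),
          PySem.List.pyGetD_eq_getElem ((x :: xs).dropLast) 0 h0
            (by simp at hlt ⊢; omega)]
      exact (List.getElem_dropLast _).symm
    have hfold : ∀ init : Int × Int,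
        (PySem.List.pyRange 0 (xs.length : Int) 1).foldr
          (fun i st => if PySem.List.pyGetD (x :: xs) i 0 > st.2
            then (st.1 + 1, PySem.List.pyGetD (x :: xs) i 0) else st) init
        = ((x :: xs).dropLast).foldr
            (fun v (st : Int × Int) => if v > st.2 then (st.1 + 1, v) else st) init := by
      intro init
      rw [← hmap, List.foldr_map]
    simp only [hlast, hfold, foldr_step_eq]
    rw [List.dropLast_concat_getLast hne]

-- ===== VERDICT (by name: the statement is the Claim_ definition above) =====
theorem find_number_of_superior_elements_spec : Claim_equal_find_number_of_superior_elements := by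
  intro arr _
  unfold Spec_find_number_of_superior_elements
  rw [a_eq_countLeaders, alt_eq_countLeaders]
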